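-- pv_equiv track=rewrite | github.com/fhabert/algav_projet | main.py | SupprMinTasTableau
-- ===== SOURCE A (Python) =====
-- def SupprMinTasTableau(t):
--     s = len(t) - 1
--     e = t[s]
--     t.pop()
--     i = 0
--     while (2 * i + 1 < s and e > t[2 * i + 1]) or (2 * i + 2 < s and e > t[2 * i + 2]):
--         if 2 * i + 2 < s and t[2 * i + 1] > t[2 * i + 2]:
--             t[i] = t[2 * i + 2]
--             i = 2 * i + 2
--         else:
--             t[i] = t[2 * i + 1]
--             i = 2 * i + 1
--     t[i] = e
--     return t
-- ===== SOURCE B (Python) =====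
-- def SupprMinTasTableau(t):
--     s = len(t) - 1
--     e = t[s]
--     t.pop()
--
--     def sift(i):
--         l = 2 * i + 1
--         r = 2 * i + 2
--         c = r if (r < s and t[l] > t[r]) else l
--         if c < s and e > t[c]:
--             t[i] = t[c]
--             sift(c)
--         else:
--             t[i] = e
--
--     sift(0)
--     return t
-- ===== Notes on version B (the rewrite author's own statement) =====
-- stated objective: alternative
-- what changed: A's iterative while-loop sift-down (guard re-tests both children each round) is replaced by the classic recursive MIN-HEAPIFY that first selects the smaller existing child and then tests and recurses on it.
import Mathlib
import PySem

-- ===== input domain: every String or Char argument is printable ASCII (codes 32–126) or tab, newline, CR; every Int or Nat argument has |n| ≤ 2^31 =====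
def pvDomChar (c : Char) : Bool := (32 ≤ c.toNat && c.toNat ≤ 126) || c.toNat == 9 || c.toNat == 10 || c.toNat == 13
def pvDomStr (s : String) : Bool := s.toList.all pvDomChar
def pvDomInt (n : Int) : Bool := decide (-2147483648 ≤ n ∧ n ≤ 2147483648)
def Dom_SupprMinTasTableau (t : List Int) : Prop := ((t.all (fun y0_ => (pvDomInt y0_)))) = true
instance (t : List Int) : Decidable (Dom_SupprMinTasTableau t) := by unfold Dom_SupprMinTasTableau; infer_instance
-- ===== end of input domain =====

-- B replaces A's iterative while-loop sift-down by the classic recursive MIN-HEAPIFY that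
-- first selects the smaller existing child and then tests/recurses (objective: alternative
-- decomposition, same cost). Both A and B mutate the argument list in place in Python; the
-- equivalence proved here is about the return value.

-- ===== PORT A =====
-- A's while loop: state (i, t); fuel bounds the iteration count (i strictly grows below s,
-- so s.toNat + 1 steps always suffice; the fuel-0 fallback is never reached under Pre_).
def SupprMinTasTableauGo (s e : Int) : Nat → Int → List Int → List Int
  | fuel, i, t =>
    if (2 * i + 1 < s ∧ e > t.getD (2 * i + 1).toNat 0) ∨
       (2 * i + 2 < s ∧ e > t.getD (2 * i + 2).toNat 0) then
      match fuel with
      | 0 => t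
      | fuel + 1 =>
        if 2 * i + 2 < s ∧ t.getD (2 * i + 1).toNat 0 > t.getD (2 * i + 2).toNat 0 then
          SupprMinTasTableauGo s e fuel (2 * i + 2) (t.set i.toNat (t.getD (2 * i + 2).toNat 0))
        else
          SupprMinTasTableauGo s e fuel (2 * i + 1) (t.set i.toNat (t.getD (2 * i + 1).toNat 0))
    else t.set i.toNat e

def SupprMinTasTableau (t : List Int) : List Int :=
  let s : Int := (t.length : Int) - 1
  let e : Int := t.getD (t.length - 1) 0      -- e = t[s]; valid under Pre_ (length ≥ 2)
  SupprMinTasTableauGo s e (s.toNat + 1) 0 t.dropLast   -- t.pop(), then the while loop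

-- ===== PORT B =====
-- B's recursive sift: pick smaller existing child c, recurse while e > t[c], else write e.
def SupprMinTasTableauSift (s e : Int) : Nat → Int → List Int → List Int
  | fuel, i, t =>
    let l : Int := 2 * i + 1
    let r : Int := 2 * i + 2
    let c : Int := if r < s ∧ t.getD l.toNat 0 > t.getD r.toNat 0 then r else l
    if c < s ∧ e > t.getD c.toNat 0 then
      match fuel with
      | 0 => t
      | fuel + 1 => SupprMinTasTableauSift s e fuel c (t.set i.toNat (t.getD c.toNat 0))
    else t.set i.toNat e

def SupprMinTasTableau_alt (t : List Int) : List Int :=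
  let s : Int := (t.length : Int) - 1
  let e : Int := t.getD (t.length - 1) 0
  SupprMinTasTableauSift s e (s.toNat + 1) 0 t.dropLast

-- ===== PRECONDITION & SPEC =====
-- Pre_ excludes only lists of length < 2, on which the Python A raises IndexError
-- (e = t[-1] on [], and the final t[0] = e write on a single-element list).
def Pre_SupprMinTasTableau (t : List Int) : Prop := 2 ≤ t.length
instance (t : List Int) : Decidable (Pre_SupprMinTasTableau t) := by
  unfold Pre_SupprMinTasTableau; infer_instance
def pvWitness_SupprMinTasTableau : List Int := [1, 2]

def Spec_SupprMinTasTableau (t : List Int) (out : List Int) : Prop := out = SupprMinTasTableau_alt t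
instance (t : List Int) (out : List Int) : Decidable (Spec_SupprMinTasTableau t out) := by
  unfold Spec_SupprMinTasTableau; infer_instance

-- ===== CLAIM (what is proved, stated in full; the proofs are below) =====
def Claim_equal_SupprMinTasTableau : Prop := ∀ (t : List Int), Dom_SupprMinTasTableau t → Pre_SupprMinTasTableau t → Spec_SupprMinTasTableau t (SupprMinTasTableau t)

-- ===== LEMMAS AND PROOFS =====

-- The loop bodies agree step for step: B's "smaller existing child" test is A's loop guard,
-- and the chosen child is A's branch.
theorem go_eq_sift (fuel : Nat) : ∀ (s e i : Int) (t : List Int),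
    SupprMinTasTableauGo s e fuel i t = SupprMinTasTableauSift s e fuel i t := by
  induction fuel with
  | zero =>
    intro s e i t
    unfold SupprMinTasTableauGo SupprMinTasTableauSift
    dsimp only
    by_cases h1 : 2 * i + 2 < s ∧ t.getD (2 * i + 1).toNat 0 > t.getD (2 * i + 2).toNat 0
    · simp only [if_pos h1]
      by_cases h2 : 2 * i + 2 < s ∧ e > t.getD (2 * i + 2).toNat 0
      · rw [if_pos (Or.inr h2), if_pos h2]
      · rw [if_neg h2, if_neg]; omega
    · simp only [if_neg h1]
      by_cases h2 : 2 * i + 1 < s ∧ e > t.getD (2 * i + 1).toNat 0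
      · rw [if_pos (Or.inl h2), if_pos h2]
      · rw [if_neg h2, if_neg]; omega
  | succ n ih =>
    intro s e i t
    unfold SupprMinTasTableauGo SupprMinTasTableauSift
    dsimp only
    by_cases h1 : 2 * i + 2 < s ∧ t.getD (2 * i + 1).toNat 0 > t.getD (2 * i + 2).toNat 0
    · simp only [if_pos h1]
      by_cases h2 : 2 * i + 2 < s ∧ e > t.getD (2 * i + 2).toNat 0
      · rw [if_pos (Or.inr h2), if_pos h2]; exact ih _ _ _ _
      · rw [if_neg h2, if_neg]; omega
    · simp only [if_neg h1]
      by_cases h2 : 2 * i + 1 < s ∧ e > t.getD (2 * i + 1).toNat 0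
      · rw [if_pos (Or.inl h2), if_pos h2]; exact ih _ _ _ _
      · rw [if_neg h2, if_neg]; omega

-- ===== VERDICT (by name: the statement is the Claim_ definition above) =====
theorem SupprMinTasTableau_spec : Claim_equal_SupprMinTasTableau := by
  intro t _ _
  unfold Spec_SupprMinTasTableau SupprMinTasTableau SupprMinTasTableau_alt
  exact go_eq_sift _ _ _ _ _
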